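-- pv_equiv track=rewrite | github.com/MalihaSabasMinzu/Phishing-Website-Classifier | phishing-website-detector-backend/src/features/feature_engineering.py | get_tld_type
-- ===== SOURCE A (Python) =====
-- def get_tld_type(domain):
--     """Classify TLD as common, suspicious, or other"""
--     common_tlds = [".com", ".org", ".net", ".edu", ".gov", ".co", ".uk", ".de", ".fr"]
--     suspicious_tlds = [".tk", ".ml", ".ga", ".cf", ".gq", ".pw", ".cc", ".club", ".xyz"]
--
--     domain_lower = domain.lower()
--
--     if any(domain_lower.endswith(tld) for tld in common_tlds):
--         return 1  # Common TLD
--     elif any(domain_lower.endswith(tld) for tld in suspicious_tlds):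
--         return 2  # Suspicious TLD
--     else:
--         return 0  # Other TLD
-- ===== SOURCE B (Python) =====
-- _COMMON_TLDS = {".com", ".org", ".net", ".edu", ".gov", ".co", ".uk", ".de", ".fr"}
-- _SUSPICIOUS_TLDS = {".tk", ".ml", ".ga", ".cf", ".gq", ".pw", ".cc", ".club", ".xyz"}
--
--
-- def get_tld_type(domain):
--     """Classify TLD as common, suspicious, or other"""
--     domain_lower = domain.lower()
--     idx = domain_lower.rfind('.')
--     if idx == -1:
--         return 0
--     tld = domain_lower[idx:]
--     if tld in _COMMON_TLDS:
--         return 1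
--     if tld in _SUSPICIOUS_TLDS:
--         return 2
--     return 0
-- ===== Notes on version B (the rewrite author's own statement) =====
-- stated objective: idiomatic
-- what changed: B extracts the TLD suffix once (rfind of the last dot, then a slice) and does two set-membership lookups, instead of A's nine endswith scans per category.
import Mathlib
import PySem

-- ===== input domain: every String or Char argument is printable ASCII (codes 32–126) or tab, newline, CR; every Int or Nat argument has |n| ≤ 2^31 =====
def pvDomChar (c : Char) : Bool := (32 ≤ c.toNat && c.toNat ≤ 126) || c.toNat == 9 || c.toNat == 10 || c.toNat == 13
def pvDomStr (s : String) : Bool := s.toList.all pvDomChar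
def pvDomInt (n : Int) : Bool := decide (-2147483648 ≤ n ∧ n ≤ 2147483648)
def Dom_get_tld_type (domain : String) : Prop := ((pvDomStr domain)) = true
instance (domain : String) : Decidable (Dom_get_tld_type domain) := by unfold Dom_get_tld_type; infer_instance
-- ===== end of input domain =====

-- B replaces A's nine endswith scans by extracting the TLD once (rfind of the last dot) and two set lookups (idiomatic).


-- ===== PORT A =====
def get_tld_type (domain : String) : Int :=
  let common_tlds : List String := [".com", ".org", ".net", ".edu", ".gov", ".co", ".uk", ".de", ".fr"]
  let suspicious_tlds : List String := [".tk", ".ml", ".ga", ".cf", ".gq", ".pw", ".cc", ".club", ".xyz"]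
  let domain_lower := PySem.Str.lower domain
  if common_tlds.any (fun tld => PySem.Str.endswith domain_lower tld) then 1
  else if suspicious_tlds.any (fun tld => PySem.Str.endswith domain_lower tld) then 2
  else 0

-- ===== PORT B =====
def pvCommonSet : PySem.Set String :=
  PySem.Set.ofList [".com", ".org", ".net", ".edu", ".gov", ".co", ".uk", ".de", ".fr"]
def pvSuspiciousSet : PySem.Set String :=
  PySem.Set.ofList [".tk", ".ml", ".ga", ".cf", ".gq", ".pw", ".cc", ".club", ".xyz"]

def get_tld_type_alt (domain : String) : Int :=
  let domain_lower := PySem.Str.lower domain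
  let idx := PySem.Str.rfind domain_lower "."
  if idx == -1 then 0
  else
    let tld := PySem.Str.slice domain_lower (some idx) none
    if PySem.Set.contains pvCommonSet tld then 1
    else if PySem.Set.contains pvSuspiciousSet tld then 2
    else 0

-- ===== PRECONDITION & SPEC =====
def Spec_get_tld_type (domain : String) (out : Int) : Prop := out = get_tld_type_alt domain
instance (domain : String) (out : Int) : Decidable (Spec_get_tld_type domain out) := by unfold Spec_get_tld_type; infer_instance

-- ===== CLAIM (what is proved, stated in full; the proofs are below) =====
def Claim_equal_get_tld_type : Prop := ∀ (domain : String), Dom_get_tld_type domain → Spec_get_tld_type domain (get_tld_type domain)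

-- ===== LEMMAS AND PROOFS =====

-- ['.'] is a prefix of l iff l starts with '.'
theorem pv_prefix_dot (l : List Char) : List.isPrefixOf ['.'] l = true ↔ l.head? = some '.' := by
  rw [List.isPrefixOf_iff_prefix]
  cases l with
  | nil => simp
  | cons c t => simp [List.cons_prefix_cons, eq_comm]

-- rfind.go returns -1 or a dot position ≤ n
theorem pv_go_cases (s : List Char) (n : Nat) :
    PySem.Chars.rfind.go s ['.'] n = -1 ∨
    ∃ k : Nat, k ≤ n ∧ PySem.Chars.rfind.go s ['.'] n = (k : Int) ∧ s[k]? = some '.' := by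
  induction n with
  | zero =>
    by_cases h : List.isPrefixOf ['.'] s = true
    · right
      refine ⟨0, le_refl _, ?_, ?_⟩
      · simp [PySem.Chars.rfind.go, h]
      · have := (pv_prefix_dot s).mp h
        rwa [List.head?_eq_getElem?] at this
    · left; simp [PySem.Chars.rfind.go, h]
  | succ j ih =>
    by_cases h : List.isPrefixOf ['.'] (s.drop (j+1)) = true
    · right
      refine ⟨j+1, le_refl _, ?_, ?_⟩
      · simp [PySem.Chars.rfind.go, h]
      · have := (pv_prefix_dot _).mp h
        rwa [List.head?_drop] at this
    · have hgo : PySem.Chars.rfind.go s ['.'] (j+1) = PySem.Chars.rfind.go s ['.'] j := by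
        simp [PySem.Chars.rfind.go, h]
      rcases ih with h1 | ⟨k, hk, hval, hdot⟩
      · left; rw [hgo]; exact h1
      · right; exact ⟨k, Nat.le_succ_of_le hk, by rw [hgo]; exact hval, hdot⟩

-- every dot position ≤ n is ≤ rfind.go
theorem pv_go_max (s : List Char) (n i : Nat) (hi : i ≤ n) (hd : s[i]? = some '.') :
    (i : Int) ≤ PySem.Chars.rfind.go s ['.'] n := by
  induction n with
  | zero =>
    have hi0 : i = 0 := Nat.le_zero.mp hi
    subst hi0
    have hpre : List.isPrefixOf ['.'] s = true :=
      (pv_prefix_dot s).mpr (by rw [List.head?_eq_getElem?]; exact hd)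
    simp [PySem.Chars.rfind.go, hpre]
  | succ j ih =>
    by_cases h : List.isPrefixOf ['.'] (s.drop (j+1)) = true
    · have hgo : PySem.Chars.rfind.go s ['.'] (j+1) = ((j:Int)+1) := by
        simp [PySem.Chars.rfind.go, h]
      rw [hgo]
      exact_mod_cast hi
    · have hgo : PySem.Chars.rfind.go s ['.'] (j+1) = PySem.Chars.rfind.go s ['.'] j := by
        simp [PySem.Chars.rfind.go, h]
      rw [hgo]
      rcases Nat.lt_or_ge i (j+1) with hlt | hge
      · exact ih (Nat.lt_succ_iff.mp hlt)
      · exfalso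
        have heq : i = j + 1 := Nat.le_antisymm hi hge
        subst heq
        exact h ((pv_prefix_dot _).mpr (by rw [List.head?_drop]; exact hd))

-- rfind s ['.'] is -1 with no dot, or the LAST dot position
theorem pv_rfind_cases (s : List Char) :
    (PySem.Chars.rfind s ['.'] = -1 ∧ '.' ∉ s) ∨
    ∃ k : Nat, PySem.Chars.rfind s ['.'] = (k : Int) ∧ s[k]? = some '.' ∧
      ∀ i : Nat, k < i → s[i]? ≠ some '.' := by
  rcases pv_go_cases s s.length with h1 | ⟨k, _, hval, hdot⟩
  · left
    refine ⟨h1, fun hmem => ?_⟩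
    obtain ⟨i, hi⟩ := List.mem_iff_getElem?.mp hmem
    have hlen : i < s.length := by
      by_contra hge
      simp [List.getElem?_eq_none (Nat.le_of_not_lt hge)] at hi
    have := pv_go_max s s.length i (Nat.le_of_lt hlen) hi
    omega
  · right
    refine ⟨k, hval, hdot, fun i hki hi => ?_⟩
    have hlen : i < s.length := by
      by_contra hge
      simp [List.getElem?_eq_none (Nat.le_of_not_lt hge)] at hi
    have hle := pv_go_max s s.length i (Nat.le_of_lt hlen) hi
    rw [hval] at hle
    have : i ≤ k := by exact_mod_cast hle
    omega

-- endswith as a decide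
theorem pv_endswith_eq_decide (L t : List Char) :
    PySem.Chars.endswith L t = decide (t <:+ L) := by
  by_cases h : t <:+ L
  · simp only [h, decide_true]
    exact (PySem.Chars.endswith_iff L t).mpr h
  · simp only [h, decide_false]
    exact Bool.eq_false_iff.mpr (fun hc => h ((PySem.Chars.endswith_iff L t).mp hc))

-- no dot in L ⟹ no ".xxx" suffix
theorem pv_endswith_false_of_no_dot (L : List Char) (h : '.' ∉ L) (cs : List Char) :
    PySem.Chars.endswith L ('.' :: cs) = false := by
  rw [pv_endswith_eq_decide, decide_eq_false_iff_not]
  rintro ⟨p, hp⟩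
  exact h (by rw [← hp]; simp)

-- KEY: with k the last dot of L and cs dot-free, "L ends with '.'::cs" iff "drop k L = '.'::cs"
theorem pv_suffix_iff_drop (L : List Char) (k : Nat) (cs : List Char)
    (hk : L[k]? = some '.') (hmax : ∀ i : Nat, k < i → L[i]? ≠ some '.') (hcs : '.' ∉ cs) :
    ('.' :: cs <:+ L) ↔ L.drop k = '.' :: cs := by
  constructor
  · rintro ⟨p, hp⟩
    have hpk : k = p.length := by
      have hpd : L[p.length]? = some '.' := by
        rw [← hp, List.getElem?_append_right (le_refl _)]
        simp
      rcases Nat.lt_trichotomy k p.length with hlt | heq | hgt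
      · exact absurd hpd (hmax p.length hlt)
      · exact heq
      · exfalso
        have hkk : L[k]? = ('.' :: cs)[k - p.length]? := by
          rw [← hp, List.getElem?_append_right (Nat.le_of_lt hgt)]
        rw [hk] at hkk
        have hpos : 0 < k - p.length := Nat.sub_pos_of_lt hgt
        have hcs' : cs[k - p.length - 1]? = some '.' := by
          rcases Nat.exists_eq_add_of_lt hpos with ⟨m, hm⟩
          rw [show k - p.length = m + 1 by omega] at hkk ⊢
          simpa using hkk.symm
        exact hcs (List.mem_of_getElem? hcs')
    rw [hpk, ← hp, List.drop_left]
  · intro h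
    rw [← h]
    exact List.drop_suffix k L

-- per-tld rewrite of A's test into B's comparison, on the last-dot branch
theorem pv_endswith_eq_beq (L : List Char) (k : Nat)
    (hk : L[k]? = some '.') (hmax : ∀ i : Nat, k < i → L[i]? ≠ some '.')
    (t : List Char) (cs : List Char) (ht : t = '.' :: cs) (hcs : '.' ∉ cs) :
    PySem.Chars.endswith L t = decide (L.drop k = t) := by
  subst ht
  rw [pv_endswith_eq_decide, decide_eq_decide]
  exact pv_suffix_iff_drop L k cs hk hmax hcs

-- A's any-endswith test, with no dot in L, is false
theorem pv_any_false_of_no_dot (L : List Char) (h : '.' ∉ L) (ts : List String)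
    (hts : ∀ t ∈ ts, ∃ cs, t.toList = '.' :: cs ∧ '.' ∉ cs) :
    ts.any (fun t => PySem.Chars.endswith L t.toList) = false := by
  rw [List.any_eq_false]
  intro t ht
  obtain ⟨cs, hcs, _⟩ := hts t ht
  rw [hcs, pv_endswith_false_of_no_dot L h cs]
  simp

-- A's any-endswith test, with k the last dot of L, is B's membership test of the extracted tld
theorem pv_any_eq_contains (L : List Char) (k : Nat)
    (hk : L[k]? = some '.') (hmax : ∀ i : Nat, k < i → L[i]? ≠ some '.')
    (ts : List String) (hts : ∀ t ∈ ts, ∃ cs, t.toList = '.' :: cs ∧ '.' ∉ cs)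
    (tld : String) (htld : tld.toList = L.drop k) :
    ts.any (fun t => PySem.Chars.endswith L t.toList) = List.contains ts tld := by
  rw [List.contains_eq_any_beq]
  apply PySem.List.any_congr_mem
  intro t ht
  obtain ⟨cs, hcs, hdotfree⟩ := hts t ht
  rw [pv_endswith_eq_beq L k hk hmax t.toList cs hcs hdotfree]
  have hiff : (L.drop k = t.toList) ↔ (tld = t) := by
    rw [← htld, String.toList_inj]
  rw [decide_eq_decide.mpr hiff]
  exact Eq.symm (Bool.beq_eq_decide_eq tld t)

-- ===== VERDICT (by name: the statement is the Claim_ definition above) =====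
theorem get_tld_type_spec : Claim_equal_get_tld_type := by
  intro domain _
  unfold Spec_get_tld_type get_tld_type get_tld_type_alt
  simp only [PySem.Str.endswith_eq]
  have hrf : PySem.Str.rfind (PySem.Str.lower domain) "." =
      PySem.Chars.rfind (PySem.Str.lower domain).toList ['.'] := by
    rw [PySem.Str.rfind_eq]; rfl
  have hcomm : ∀ t ∈ ([".com", ".org", ".net", ".edu", ".gov", ".co", ".uk", ".de", ".fr"] :
      List String), ∃ cs, t.toList = '.' :: cs ∧ '.' ∉ cs := by
    intro t ht; fin_cases ht <;> exact ⟨_, rfl, by decide⟩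
  have hsusp : ∀ t ∈ ([".tk", ".ml", ".ga", ".cf", ".gq", ".pw", ".cc", ".club", ".xyz"] :
      List String), ∃ cs, t.toList = '.' :: cs ∧ '.' ∉ cs := by
    intro t ht; fin_cases ht <;> exact ⟨_, rfl, by decide⟩
  rcases pv_rfind_cases (PySem.Str.lower domain).toList with ⟨hneg, hnodot⟩ | ⟨k, hval, hdot, hmax⟩
  · -- no dot: both sides are 0
    have h1 := pv_any_false_of_no_dot _ hnodot _
      (fun t ht => ⟨(hcomm t ht).choose, (hcomm t ht).choose_spec.1, (hcomm t ht).choose_spec.2⟩)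
    have h2 := pv_any_false_of_no_dot _ hnodot _
      (fun t ht => ⟨(hsusp t ht).choose, (hsusp t ht).choose_spec.1, (hsusp t ht).choose_spec.2⟩)
    have hB : (PySem.Str.rfind (PySem.Str.lower domain) "." == (-1 : Int)) = true := by
      rw [hrf, hneg]; rfl
    simp only [h1, h2, hB]
    simp
  · -- last dot at position k
    have hB : (PySem.Str.rfind (PySem.Str.lower domain) "." == (-1 : Int)) = false := by
      rw [hrf, hval, beq_eq_false_iff_ne]
      omega
    have htld : (PySem.Str.slice (PySem.Str.lower domain)
        (some (PySem.Str.rfind (PySem.Str.lower domain) ".")) none).toList =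
        (PySem.Str.lower domain).toList.drop k := by
      rw [hrf, hval, PySem.Str.toList_slice, PySem.Chars.slice_eq_listSlice,
          PySem.List.slice_from _ (by omega : (0:Int) ≤ (k:Int))]
      simp
    have h1 := pv_any_eq_contains _ k hdot hmax _ hcomm _ htld
    have h2 := pv_any_eq_contains _ k hdot hmax _ hsusp _ htld
    have hc : pvCommonSet = ([".com", ".org", ".net", ".edu", ".gov", ".co", ".uk", ".de", ".fr"] :
        List String) := by decide
    have hs : pvSuspiciousSet = ([".tk", ".ml", ".ga", ".cf", ".gq", ".pw", ".cc", ".club", ".xyz"] :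
        List String) := by decide
    simp only [h1, h2, hB, Bool.false_eq_true, if_false, PySem.Set.contains, hc, hs]
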